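-- pv_equiv track=rewrite | github.com/yunn3/recursion-problems | 157-characterLocation/main.py | characterLocation
-- ===== SOURCE A (Python) =====
-- def characterLocation(commands: list[str]) -> list:
--     cordinates = [0, 0]
--
--     commands_list = {
--         "N": {"direction": 1, "magnitude": 1},
--         "E": {"direction": 0, "magnitude": 1},
--         "S": {"direction": 1, "magnitude": -1},
--         "W": {"direction": 0, "magnitude": -1},
--     }
--
--     for command in commands:
--         if command in commands_list:
--             cordinates[commands_list[command]["direction"]] = (
--                 cordinates[commands_list[command]["direction"]]
--                 + commands_list[command]["magnitude"]
--             )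
--
--     return cordinates
-- ===== SOURCE B (Python) =====
-- def characterLocation(commands: list[str]) -> list:
--     return [commands.count("E") - commands.count("W"),
--             commands.count("N") - commands.count("S")]
-- ===== Notes on version B (the rewrite author's own statement) =====
-- stated objective: simpler
-- what changed: Replaces the accumulator loop with nested dict lookups by a direct per-axis closed form from four independent count scans.
import Mathlib
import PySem

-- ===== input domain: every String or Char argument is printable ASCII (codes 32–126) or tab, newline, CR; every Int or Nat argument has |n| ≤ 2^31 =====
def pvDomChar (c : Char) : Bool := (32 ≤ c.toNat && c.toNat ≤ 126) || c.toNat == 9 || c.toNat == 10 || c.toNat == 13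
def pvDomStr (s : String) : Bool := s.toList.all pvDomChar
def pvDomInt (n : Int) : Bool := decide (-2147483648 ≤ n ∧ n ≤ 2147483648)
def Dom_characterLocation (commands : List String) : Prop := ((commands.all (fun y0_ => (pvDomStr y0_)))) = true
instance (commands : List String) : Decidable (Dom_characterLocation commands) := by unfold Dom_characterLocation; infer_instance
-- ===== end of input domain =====

-- ===== PORT A =====
-- Port of A: fold over commands maintaining the coordinate pair (x, y),
-- updating the axis selected by the command, as A's dict-driven loop does.
def characterLocation (commands : List String) : List Int :=
  let p := commands.foldl (fun (c : Int × Int) command =>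
    if command = "N" then (c.1, c.2 + 1)
    else if command = "E" then (c.1 + 1, c.2)
    else if command = "S" then (c.1, c.2 - 1)
    else if command = "W" then (c.1 - 1, c.2)
    else c) (0, 0)
  [p.1, p.2]

-- ===== PORT B =====
-- Port of B: per-axis closed form from four independent count scans.
def characterLocation_alt (commands : List String) : List Int :=
  [(PySem.List.count commands "E" : Int) - PySem.List.count commands "W",
   (PySem.List.count commands "N" : Int) - PySem.List.count commands "S"]

-- ===== PRECONDITION & SPEC =====
def Spec_characterLocation (commands : List String) (out : List Int) : Prop := out = characterLocation_alt commands
instance (commands : List String) (out : List Int) : Decidable (Spec_characterLocation commands out) := by unfold Spec_characterLocation; infer_instance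

-- ===== CLAIM (what is proved, stated in full; the proofs are below) =====
def Claim_equal_characterLocation : Prop := ∀ (commands : List String), Dom_characterLocation commands → Spec_characterLocation commands (characterLocation commands)

-- ===== LEMMAS AND PROOFS =====

-- ===== VERDICT (by name: the statement is the Claim_ definition above) =====
theorem characterLocation_fold (commands : List String) (a b : Int) :
    commands.foldl (fun (c : Int × Int) command =>
      if command = "N" then (c.1, c.2 + 1)
      else if command = "E" then (c.1 + 1, c.2)
      else if command = "S" then (c.1, c.2 - 1)
      else if command = "W" then (c.1 - 1, c.2)
      else c) (a, b)
    = (a + (PySem.List.count commands "E" : Int) - PySem.List.count commands "W",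
       b + (PySem.List.count commands "N" : Int) - PySem.List.count commands "S") := by
  induction commands generalizing a b with
  | nil => simp [PySem.List.count]
  | cons h t ih =>
    by_cases hN : h = "N" <;> by_cases hE : h = "E" <;> by_cases hS : h = "S" <;>
      by_cases hW : h = "W" <;>
      simp_all [PySem.List.count, List.count_cons, ih] <;> push_cast <;> ring

theorem characterLocation_spec : Claim_equal_characterLocation := by
  intro commands _
  unfold Spec_characterLocation characterLocation characterLocation_alt
  simp [characterLocation_fold]
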